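-- pv_equiv track=rewrite | github.com/zionsc/leetcode | Arrays & Hashing/2437. Number of Valid Clock Times/2437.py | countTime
-- ===== SOURCE A (Python) =====
-- def countTime(time: str) -> int:
--     res = 1
--     for i,t in enumerate(time):
--         if t == '?':
--             if i == 0:
--                 if time[1] == '?':
--                     res *= 24
--                 elif time[1] < '4':
--                     res *= 3
--                 else:
--                     res *= 2
--             if i == 1:
--                 if time[0] == '?':
--                     continue
--                 elif time[0] == '2':
--                     res *= 4
--                 else:
--                     res *= 10
--             if i == 3:
--                 res *= 6
--             if i == 4:
--                 res *= 10
--     return res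
-- ===== SOURCE B (Python) =====
-- def countTime(time: str) -> int:
--     hour = time[0:2]
--     if '?' in hour:
--         tens = '012' if hour[0:1] == '?' else hour[0:1]
--         ones = '0123456789' if hour[1:2] == '?' else hour[1:2]
--         res = sum(1 for x in tens for y in ones if not (x == '2' and y >= '4'))
--     else:
--         res = 1
--     if time[3:4] == '?':
--         res *= 6
--     if time[4:5] == '?':
--         res *= 10
--     return res
-- ===== Notes on version B (the rewrite author's own statement) =====
-- stated objective: alternative
-- what changed: A loops over the pattern's characters multiplying hard-coded positional factors (24/3/2/4/10); B never loops over the string: it derives the hour factor by counting the wildcard completions of the two-character hour field under the single validity constraint (no hour 24..29), and multiplies in the minute wildcards.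
-- outside the precondition, e.g. on countTime('?'): A raises IndexError, B returns 0
import Mathlib
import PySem

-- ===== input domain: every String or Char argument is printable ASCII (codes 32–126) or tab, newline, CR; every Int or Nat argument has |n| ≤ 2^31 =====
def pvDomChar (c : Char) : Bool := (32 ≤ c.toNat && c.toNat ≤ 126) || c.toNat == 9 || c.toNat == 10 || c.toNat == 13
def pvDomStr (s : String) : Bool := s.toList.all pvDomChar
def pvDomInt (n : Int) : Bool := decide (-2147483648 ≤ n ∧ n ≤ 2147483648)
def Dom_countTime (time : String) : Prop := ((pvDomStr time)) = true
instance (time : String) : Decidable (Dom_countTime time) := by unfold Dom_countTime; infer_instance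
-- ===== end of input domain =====

-- B replaces A's positional loop with its hard-coded factor table (24/3/2/4/10) by
-- counting the wildcard completions of the hour field directly (a two-variable
-- comprehension with the single validity constraint «no hour 24..29»).

-- ===== PORT A =====
-- literal port of A's loop over the characters of `time` (strings are handled as
-- their character lists); the loop body is the helper pvBody; time[1] / time[0]
-- are PySem.List.pyGet? (the getD fallback is never reached where A returns:
-- it is only consulted when index 1 exists or, on ['?'], where A raises — outside Pre_)
def pvBody (tl : List Char) (res : Int) (it : Int × Char) : Int :=
  let i := it.1
  let t := it.2
  if t = '?' then
    let res :=
      if i = 0 then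
        if (PySem.List.pyGet? tl 1).getD ' ' = '?' then res * 24
        else if (PySem.List.pyGet? tl 1).getD ' ' < '4' then res * 3
        else res * 2
      else res
    -- 'continue' in the i == 1 branch: skip the rest of this iteration
    if i = 1 ∧ (PySem.List.pyGet? tl 0).getD ' ' = '?' then res
    else
      let res :=
        if i = 1 then
          if (PySem.List.pyGet? tl 0).getD ' ' = '2' then res * 4 else res * 10
        else res
      let res := if i = 3 then res * 6 else res
      if i = 4 then res * 10 else res
  else res

def countTimeCore (tl : List Char) : Int :=
  (PySem.List.enumerate tl 0).foldl (pvBody tl) 1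

def countTime (time : String) : Int := countTimeCore time.toList

-- ===== PORT B =====
-- literal port of Source B on the character list; string slices are PySem.List.slice,
-- the comprehension sum(1 for x in tens for y in ones if …) is a flatMap/map of
-- 0/1 terms summed
def countTimeAltCore (tl : List Char) : Int :=
  let hour := PySem.List.slice tl (some 0) (some 2)
  let res :=
    if '?' ∈ hour then
      let tens := if PySem.List.slice hour (some 0) (some 1) = ['?']
        then ['0', '1', '2'] else PySem.List.slice hour (some 0) (some 1)
      let ones := if PySem.List.slice hour (some 1) (some 2) = ['?']
        then ['0', '1', '2', '3', '4', '5', '6', '7', '8', '9']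
        else PySem.List.slice hour (some 1) (some 2)
      ((tens.flatMap (fun x => ones.map (fun y =>
        if ¬(x = '2' ∧ '4' ≤ y) then (1 : Int) else 0))).sum)
    else 1
  let res := if PySem.List.slice tl (some 3) (some 4) = ['?'] then res * 6 else res
  if PySem.List.slice tl (some 4) (some 5) = ['?'] then res * 10 else res

def countTime_alt (time : String) : Int := countTimeAltCore time.toList

-- ===== PRECONDITION & SPEC =====
-- Pre_ excludes only the single string "?", where A raises IndexError (time[1]
-- on a length-1 string); A returns normally everywhere else.
def Pre_countTime (time : String) : Prop := ¬ (time.toList = ['?'])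
instance (time : String) : Decidable (Pre_countTime time) := by unfold Pre_countTime; infer_instance

def pvWitness_countTime : String := "?3:5?"

def Spec_countTime (time : String) (out : Int) : Prop := out = countTime_alt time
instance (time : String) (out : Int) : Decidable (Spec_countTime time out) := by unfold Spec_countTime; infer_instance

-- ===== CLAIM (what is proved, stated in full; the proofs are below) =====
def Claim_equal_countTime : Prop := ∀ (time : String), Dom_countTime time → Pre_countTime time → Spec_countTime time (countTime time)

-- ===== LEMMAS AND PROOFS =====

-- A's positional factors, as closed forms of the relevant characters
def pvFA (a b : Char) : Int :=
  if a = '?' then (if b = '?' then 24 else if b < '4' then 3 else 2)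
  else if b = '?' then (if a = '2' then 4 else 10) else 1

def pvF3 (d : Char) : Int := if d = '?' then 6 else 1
def pvF4 (e : Char) : Int := if e = '?' then 10 else 1

-- past index 4, A's loop body never fires
lemma pvTailNoop (tl : List Char) (rest : List Char) :
    ∀ (k : Int) (res : Int), 5 ≤ k →
      (PySem.List.enumerate rest k).foldl (pvBody tl) res = res := by
  induction rest with
  | nil => intro k res _; simp [PySem.List.enumerate_nil]
  | cons x xs ih =>
    intro k res hk
    rw [PySem.List.enumerate_cons, List.foldl_cons]
    have hb : pvBody tl res (k, x) = res := by
      simp [pvBody, (show k ≠ 0 by omega), (show k ≠ 1 by omega),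
        (show k ≠ 3 by omega), (show k ≠ 4 by omega)]
    rw [hb]
    exact ih (k + 1) res (by omega)

-- A's value on each list shape
lemma pvCore0 : countTimeCore [] = 1 := rfl

lemma pvCore1 (a : Char) (ha : a ≠ '?') : countTimeCore [a] = 1 := by
  simp [countTimeCore, PySem.List.enumerate_cons, PySem.List.enumerate_nil, pvBody, ha]

lemma pvCore2 (a b : Char) : countTimeCore [a, b] = pvFA a b := by
  unfold countTimeCore pvFA
  by_cases ha : a = '?' <;> by_cases hb : b = '?' <;>
    simp [PySem.List.enumerate_cons, PySem.List.enumerate_nil, pvBody,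
      PySem.List.pyGet?, PySem.List.pyIdx?, ha, hb]

lemma pvCore3 (a b c : Char) : countTimeCore [a, b, c] = pvFA a b := by
  unfold countTimeCore pvFA
  by_cases ha : a = '?' <;> by_cases hb : b = '?' <;> by_cases hc : c = '?' <;>
    simp [PySem.List.enumerate_cons, PySem.List.enumerate_nil, pvBody,
      PySem.List.pyGet?, PySem.List.pyIdx?, ha, hb, hc]

lemma pvCore4 (a b c d : Char) : countTimeCore [a, b, c, d] = pvFA a b * pvF3 d := by
  unfold countTimeCore pvFA pvF3
  by_cases ha : a = '?' <;> by_cases hb : b = '?' <;> by_cases hc : c = '?' <;>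
    by_cases hd : d = '?' <;>
    simp [PySem.List.enumerate_cons, PySem.List.enumerate_nil, pvBody,
      PySem.List.pyGet?, PySem.List.pyIdx?, ha, hb, hc, hd]

set_option maxHeartbeats 1600000 in
lemma pvCore5 (a b c d e : Char) (rest : List Char) :
    countTimeCore (a :: b :: c :: d :: e :: rest) = pvFA a b * pvF3 d * pvF4 e := by
  unfold countTimeCore pvFA pvF3 pvF4
  rw [PySem.List.enumerate_cons, PySem.List.enumerate_cons, PySem.List.enumerate_cons,
    PySem.List.enumerate_cons, PySem.List.enumerate_cons]
  simp only [List.foldl_cons]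
  rw [show (0:Int) + 1 + 1 + 1 + 1 + 1 = 5 by norm_num,
    pvTailNoop _ rest 5 _ (by norm_num)]
  have g0 : (PySem.List.pyGet? (a :: b :: c :: d :: e :: rest) 0).getD ' ' = a := by
    simp [pysem]
  have g1 : (PySem.List.pyGet? (a :: b :: c :: d :: e :: rest) 1).getD ' ' = b := by
    simp [pysem]
  by_cases ha : a = '?' <;> by_cases hb : b = '?' <;>
    by_cases hd : d = '?' <;> by_cases he : e = '?' <;>
    simp [pvBody, g0, g1, ha, hb, hd, he] <;> simp [pysem, hb]

-- B's completion count of the hour field equals A's hour factor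
lemma pvHourEq (a b : Char) :
    (if '?' = a ∨ '?' = b then
      (((if a = '?' then ['0', '1', '2'] else [a]).flatMap (fun x =>
        (if b = '?' then ['0', '1', '2', '3', '4', '5', '6', '7', '8', '9']
          else [b]).map (fun y =>
          if x = '2' → y < '4' then (1 : Int) else 0))).sum)
     else 1) = pvFA a b := by
  rcases eq_or_ne a '?' with ha | ha <;> rcases eq_or_ne b '?' with hb | hb
  · subst ha; subst hb; decide
  · subst ha
    have hb' : ¬('?' = b) := fun h => hb h.symm
    simp only [pvFA, if_pos rfl, if_neg hb]
    rcases le_or_gt '4' b with h4 | h4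
    · simp [not_lt.mpr h4]
    · simp [h4]
  · subst hb
    have ha' : ¬('?' = a) := fun h => ha h.symm
    simp only [pvFA, if_pos (Or.inr rfl), if_neg ha]
    by_cases ha2 : a = '2' <;> simp [ha2]
  · have ha' : ¬('?' = a) := fun h => ha h.symm
    have hb' : ¬('?' = b) := fun h => hb h.symm
    simp [pvFA, ha, hb, ha', hb']

-- B's value on each list shape
lemma pvAlt0 : countTimeAltCore [] = 1 := rfl

lemma pvAlt1 (a : Char) (ha : a ≠ '?') : countTimeAltCore [a] = 1 := by
  have ha' : ¬('?' = a) := fun h => ha h.symm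
  simp [countTimeAltCore, PySem.List.slice, PySem.List.clampIdx, ha']

lemma pvAlt2 (a b : Char) : countTimeAltCore [a, b] = pvFA a b := by
  have h := pvHourEq a b
  unfold countTimeAltCore
  simp [PySem.List.slice, PySem.List.clampIdx, h]

lemma pvAlt3 (a b c : Char) : countTimeAltCore [a, b, c] = pvFA a b := by
  have h := pvHourEq a b
  unfold countTimeAltCore
  simp [PySem.List.slice, PySem.List.clampIdx, h]

lemma pvAlt4 (a b c d : Char) : countTimeAltCore [a, b, c, d] = pvFA a b * pvF3 d := by
  have h := pvHourEq a b
  unfold countTimeAltCore pvF3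
  by_cases hd : d = '?' <;>
    [have hd' : ('?':Char) = d := hd.symm; have hd' : ¬(('?':Char) = d) := fun x => hd x.symm] <;>
    simp [PySem.List.slice, PySem.List.clampIdx, hd, h]

lemma pvAlt5 (a b c d e : Char) (rest : List Char) :
    countTimeAltCore (a :: b :: c :: d :: e :: rest) = pvFA a b * pvF3 d * pvF4 e := by
  have h := pvHourEq a b
  unfold countTimeAltCore pvF3 pvF4
  by_cases hd : d = '?' <;> by_cases he : e = '?' <;>
    simp [PySem.List.slice, PySem.List.clampIdx, hd, he, h]

theorem countTime_spec : Claim_equal_countTime := by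
  intro time _ pre
  unfold Spec_countTime countTime countTime_alt
  unfold Pre_countTime at pre
  rcases hl : time.toList with _ | ⟨a, _ | ⟨b, _ | ⟨c, _ | ⟨d, _ | ⟨e, rest⟩⟩⟩⟩⟩
  · rw [pvCore0, pvAlt0]
  · have ha : a ≠ '?' := by rintro rfl; exact pre hl
    rw [pvCore1 a ha, pvAlt1 a ha]
  · rw [pvCore2, pvAlt2]
  · rw [pvCore3, pvAlt3]
  · rw [pvCore4, pvAlt4]
  · rw [pvCore5, pvAlt5]
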